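-- pv_equiv track=rewrite | github.com/pborenstein/obsidian-tag-tools | utils/tag_normalizer.py | get_tag_hierarchy
-- ===== SOURCE A (Python) =====
-- from typing import List, Set
--
-- def is_nested_tag(tag: str) -> bool:
--     """
--     Check if a tag is nested (contains forward slash).
--
--     Args:
--         tag: Tag string to check
--
--     Returns:
--         True if tag is nested, False otherwise
--     """
--     return '/' in tag
--
-- def get_tag_hierarchy(tag: str) -> List[str]:
--     """
--     Get the tag hierarchy for a nested tag.
--
--     Args:
--         tag: Nested tag string (e.g., "parent/child/grandchild")
--
--     Returns:
--         List of tag hierarchy levels (e.g., ["parent", "parent/child", "parent/child/grandchild"])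
--     """
--     if not is_nested_tag(tag):
--         return [tag]
--
--     parts = tag.split('/')
--     hierarchy = []
--
--     for i in range(len(parts)):
--         level = '/'.join(parts[:i+1])
--         hierarchy.append(level)
--
--     return hierarchy
-- ===== SOURCE B (Python) =====
-- from typing import List
--
--
-- def get_tag_hierarchy(tag: str) -> List[str]:
--     """Build the tag hierarchy by accumulating a running prefix over the parts."""
--     hierarchy = []
--     prefix = None
--     for part in tag.split('/'):
--         prefix = part if prefix is None else prefix + '/' + part
--         hierarchy.append(prefix)
--     return hierarchy
-- ===== Notes on version B (the rewrite author's own statement) =====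
-- stated objective: simpler
-- what changed: B drops the is_nested_tag guard and replaces the index loop that re-slices parts[:i+1] and re-joins each level from scratch with a single accumulating pass that extends the previous prefix by one part.
import Mathlib
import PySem

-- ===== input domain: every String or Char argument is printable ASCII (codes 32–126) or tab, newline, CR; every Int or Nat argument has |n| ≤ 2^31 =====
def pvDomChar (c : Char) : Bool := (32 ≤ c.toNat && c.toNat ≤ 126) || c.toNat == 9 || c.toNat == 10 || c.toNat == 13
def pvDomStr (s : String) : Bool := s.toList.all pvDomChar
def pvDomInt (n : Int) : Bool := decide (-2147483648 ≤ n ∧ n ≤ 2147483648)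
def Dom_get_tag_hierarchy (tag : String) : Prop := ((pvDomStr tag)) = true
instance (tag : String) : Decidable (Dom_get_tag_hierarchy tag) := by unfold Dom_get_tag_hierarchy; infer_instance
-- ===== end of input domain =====

-- B drops A's is_nested_tag guard and builds each level by extending the previous
-- accumulated prefix, instead of re-slicing parts[:i+1] and re-joining from scratch.

-- ===== PORT A =====
-- is_nested_tag(tag) = '/' in tag
def is_nested_tag (tag : String) : Bool := PySem.Str.isIn "/" tag

def get_tag_hierarchy (tag : String) : List String :=
  if is_nested_tag tag = false then [tag]
  else
    (PySem.List.pyRange 0 ((PySem.Chars.splitOn tag.toList ['/']).length : Int) 1).foldl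
      (fun hierarchy i =>
        hierarchy ++ [String.ofList (PySem.Chars.join ['/']
          (PySem.List.slice (PySem.Chars.splitOn tag.toList ['/']) none (some (i + 1))))])
      []

-- ===== PORT B =====
-- one step of B's loop body: extend the running prefix (None before the first part)
def altStep (st : List String × Option (List Char)) (part : List Char) :
    List String × Option (List Char) :=
  match st.2 with
  | none => (st.1 ++ [String.ofList part], some part)
  | some q => (st.1 ++ [String.ofList (q ++ '/' :: part)], some (q ++ '/' :: part))

def get_tag_hierarchy_alt (tag : String) : List String :=
  ((PySem.Chars.splitOn tag.toList ['/']).foldl altStep ([], none)).1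

-- ===== PRECONDITION & SPEC =====
def Spec_get_tag_hierarchy (tag : String) (out : List String) : Prop := out = get_tag_hierarchy_alt tag
instance (tag : String) (out : List String) : Decidable (Spec_get_tag_hierarchy tag out) := by unfold Spec_get_tag_hierarchy; infer_instance

-- ===== CLAIM (what is proved, stated in full; the proofs are below) =====
def Claim_equal_get_tag_hierarchy : Prop := ∀ (tag : String), Dom_get_tag_hierarchy tag → Spec_get_tag_hierarchy tag (get_tag_hierarchy tag)

-- ===== LEMMAS AND PROOFS =====

-- splitOn finds no separator when the string has none
lemma go_no_sep (fuel : Nat) : ∀ (l cur : List Char) (acc : List (List Char)),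
    (∀ c ∈ l, c ≠ '/') →
    PySem.Chars.splitOn.go ['/'] fuel l cur acc = ((cur.reverse ++ l) :: acc).reverse := by
  induction fuel with
  | zero => intro l cur acc _; rw [PySem.Chars.splitOn.go]
  | succ f ih =>
    intro l cur acc h
    cases l with
    | nil => rw [PySem.Chars.splitOn.go]; simp; omega
    | cons c rest =>
      rw [PySem.Chars.splitOn.go]
      have hc : c ≠ '/' := h c (by simp)
      have hp : List.isPrefixOf ['/'] (c :: rest) = false := by
        simp [List.isPrefixOf]; exact fun e => (hc e.symm).elim
      simp only [hp, if_neg Bool.false_ne_true]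
      rw [ih rest (c :: cur) acc (fun x hx => h x (by simp [hx]))]
      simp

lemma splitOn_no_sep (l : List Char) (h : ∀ c ∈ l, c ≠ '/') :
    PySem.Chars.splitOn l ['/'] = [l] := by
  rw [PySem.Chars.splitOn, go_no_sep _ _ _ _ h]; simp

-- gluing a joined pair back into the head of a join
lemma join_glue (sep q p : List Char) (xs : List (List Char)) :
    PySem.Chars.join sep ((q ++ sep ++ p) :: xs) = PySem.Chars.join sep (q :: p :: xs) := by
  cases xs with
  | nil => rw [PySem.Chars.join_singleton, PySem.Chars.join_cons_cons, PySem.Chars.join_singleton]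
  | cons a as =>
    rw [PySem.Chars.join_cons_cons, PySem.Chars.join_cons_cons, PySem.Chars.join_cons_cons]
    simp [List.append_assoc]

-- A's loop as a map over prefix lengths
lemma loopA_eq_map (parts : List (List Char)) :
    (PySem.List.pyRange 0 (parts.length : Int) 1).foldl
      (fun hierarchy i =>
        hierarchy ++ [String.ofList (PySem.Chars.join ['/'] (PySem.List.slice parts none (some (i + 1))))])
      []
    = (List.range parts.length).map
        (fun k => String.ofList (PySem.Chars.join ['/'] (parts.take (k + 1)))) := by
  rw [PySem.List.foldl_append_singleton_eq_map, PySem.List.pyRange_zero_natCast, List.map_map]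
  simp only [List.nil_append]
  apply List.map_congr_left
  intro k _
  simp only [Function.comp_apply]
  have hcast : ((k : Int) + 1) = ((k + 1 : Nat) : Int) := by push_cast; ring
  rw [hcast, PySem.List.slice_to_natCast]

-- invariant of B's fold once a prefix exists
lemma loopB_go (l : List (List Char)) : ∀ (h : List String) (q : List Char),
    (l.foldl altStep (h, some q)).1
      = h ++ (List.range l.length).map
          (fun k => String.ofList (PySem.Chars.join ['/'] (q :: l.take (k + 1)))) := by
  induction l with
  | nil => intro h q; simp
  | cons p rest ih =>
    intro h q
    simp only [List.foldl_cons, altStep]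
    rw [ih (h ++ [String.ofList (q ++ '/' :: p)]) (q ++ '/' :: p)]
    have hnp : q ++ '/' :: p = q ++ ['/'] ++ p := by simp
    have hrange : List.range (p :: rest).length = 0 :: (List.range rest.length).map Nat.succ := by
      simp [List.range_succ_eq_map]
    rw [hrange, List.map_cons, List.map_map, List.append_assoc]
    congr 1
    rw [List.singleton_append]
    congr 1
    · rw [List.take_succ_cons, List.take_zero, PySem.Chars.join_cons_cons,
        PySem.Chars.join_singleton, hnp]
    · apply List.map_congr_left
      intro k _
      simp only [Function.comp_apply, Nat.succ_eq_add_one]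
      rw [hnp, join_glue, List.take_succ_cons]

-- B's fold as the same map over prefix lengths
lemma loopB_eq_map (parts : List (List Char)) :
    ((parts.foldl altStep ([], none)).1)
      = (List.range parts.length).map
          (fun k => String.ofList (PySem.Chars.join ['/'] (parts.take (k + 1)))) := by
  cases parts with
  | nil => simp
  | cons p rest =>
    simp only [List.foldl_cons, altStep, List.nil_append]
    rw [loopB_go rest [String.ofList p] p]
    have hrange : List.range (p :: rest).length = 0 :: (List.range rest.length).map Nat.succ := by
      simp [List.range_succ_eq_map]
    rw [hrange, List.map_cons, List.map_map, List.singleton_append]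
    congr 1
    rw [List.take_succ_cons, List.take_zero, PySem.Chars.join_singleton]

-- ===== VERDICT (by name: the statement is the Claim_ definition above) =====
theorem get_tag_hierarchy_spec : Claim_equal_get_tag_hierarchy := by
  intro tag _
  unfold Spec_get_tag_hierarchy get_tag_hierarchy get_tag_hierarchy_alt is_nested_tag
  by_cases hin : PySem.Str.isIn "/" tag = false
  · have hnm : ∀ c ∈ tag.toList, c ≠ '/' := by
      intro c hc he
      subst he
      obtain ⟨s, t, hst⟩ := List.append_of_mem hc
      have : PySem.Str.isIn "/" tag = true := by
        rw [PySem.Str.isIn_iff_infix]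
        refine ⟨s, t, ?_⟩
        rw [hst]
        simp
      rw [this] at hin
      simp at hin
    rw [splitOn_no_sep tag.toList hnm, if_pos hin]
    simp [altStep]
  · rw [if_neg hin]
    rw [loopA_eq_map, loopB_eq_map]
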